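-- pv_equiv track=rewrite | github.com/jrandre2/texas-glo-nlp | src/spatial_mapper.py | detect_property_key
-- ===== SOURCE A (Python) =====
-- from typing import Dict, Iterable, List, Optional, Tuple
--
-- def detect_property_key(geojson: dict, candidates: List[str]) -> Optional[str]:
--     features = geojson.get('features', [])
--     if not features:
--         return None
--     # Prefer key present in all features
--     counts = {c: 0 for c in candidates}
--     for feature in features:
--         props = feature.get('properties', {})
--         for c in candidates:
--             if c in props:
--                 counts[c] += 1
--     best = max(counts.items(), key=lambda x: x[1]) if counts else (None, 0)
--     return best[0] if best[1] > 0 else None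
-- ===== SOURCE B (Python) =====
-- from typing import List, Optional
--
-- def detect_property_key(geojson: dict, candidates: List[str]) -> Optional[str]:
--     features = geojson.get('features', [])
--     if not features or not candidates:
--         return None
--     cand_set = set(candidates)
--     counter = {}
--     for feature in features:
--         for k in feature.get('properties', {}):
--             if k in cand_set:
--                 counter[k] = counter.get(k, 0) + 1
--     best_key, best_count = None, 0
--     for c in candidates:
--         n = counter.get(c, 0)
--         if n > best_count:
--             best_key, best_count = c, n
--     return best_key
-- ===== Notes on version B (the rewrite author's own statement) =====
-- stated objective: alternative
-- what changed: B replaces A's per-feature scan over the whole candidate list and the max() over the counts dict by a counter built from each feature's own property keys (filtered through a candidate set) plus a single ordered strict-max scan over the candidates.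
import Mathlib
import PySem

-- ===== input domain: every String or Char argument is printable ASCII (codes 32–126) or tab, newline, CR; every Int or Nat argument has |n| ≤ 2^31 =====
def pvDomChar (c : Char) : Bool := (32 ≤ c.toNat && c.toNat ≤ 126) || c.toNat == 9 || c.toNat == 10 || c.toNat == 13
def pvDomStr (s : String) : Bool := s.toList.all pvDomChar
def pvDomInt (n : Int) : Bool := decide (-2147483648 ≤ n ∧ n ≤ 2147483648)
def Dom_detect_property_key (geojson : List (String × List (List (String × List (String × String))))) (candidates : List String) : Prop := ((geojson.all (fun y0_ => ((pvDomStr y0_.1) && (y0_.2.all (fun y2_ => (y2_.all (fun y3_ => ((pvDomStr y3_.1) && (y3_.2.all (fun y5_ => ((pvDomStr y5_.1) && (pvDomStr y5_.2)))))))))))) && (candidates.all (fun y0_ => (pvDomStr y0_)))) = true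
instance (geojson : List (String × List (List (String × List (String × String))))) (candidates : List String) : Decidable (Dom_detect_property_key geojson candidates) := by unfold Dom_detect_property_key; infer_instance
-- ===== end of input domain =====

-- B replaces A's per-feature scan over all candidates and the max() over the counts dict by a
-- counter built from each feature's own property keys plus a single ordered strict-max scan
-- over the candidates (objective: alternative decomposition; return value only, no mutation).

-- ===== PORT A =====
def detect_property_key (geojson : List (String × List (List (String × List (String × String))))) (candidates : List String) : Option String :=
  let features := (PySem.Dict.mk geojson).getD "features" []
  if features.isEmpty then none
  else
    let counts := features.foldl
      (fun cnts feature =>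
        candidates.foldl
          (fun cnts c =>
            if (PySem.Dict.mk ((PySem.Dict.mk feature).getD "properties" [])).contains c then
              cnts.modify c 0 (· + 1)
            else cnts)
          cnts)
      (candidates.foldl (fun d c => d.insert c (0 : Int)) PySem.Dict.empty)
    let best : Option String × Int :=
      match PySem.List.max? counts.items (fun x => x.2) with
      | some p => (some p.1, p.2)
      | none => (none, 0)
    if best.2 > 0 then best.1 else none

-- ===== PORT B =====
def detect_property_key_alt (geojson : List (String × List (List (String × List (String × String))))) (candidates : List String) : Option String :=
  let features := (PySem.Dict.mk geojson).getD "features" []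
  if features.isEmpty || candidates.isEmpty then none
  else
    let candSet : PySem.Set String := PySem.Set.ofList candidates
    let counter := features.foldl
      (fun ctr feature =>
        (PySem.List.dedup (((PySem.Dict.mk feature).getD "properties" []).map Prod.fst)).foldl
          (fun ctr k => if PySem.Set.contains candSet k then ctr.modify k 0 (· + 1) else ctr)
          ctr)
      (PySem.Dict.empty : PySem.Dict String Int)
    let best := candidates.foldl
      (fun (b : Option String × Int) c =>
        if counter.getD c 0 > b.2 then (some c, counter.getD c 0) else b)
      (none, 0)
    best.1

-- ===== PRECONDITION & SPEC =====
-- Pre_ excludes candidate lists with duplicate entries: there A's per-occurrence inner loop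
-- weights each candidate's count by its multiplicity, an accidental corner of dict-vs-list
-- iteration on which neither weighted nor unweighted counting is the specified behaviour.
def Pre_detect_property_key (geojson : List (String × List (List (String × List (String × String))))) (candidates : List String) : Prop :=
  candidates.Nodup
instance (geojson : List (String × List (List (String × List (String × String))))) (candidates : List String) : Decidable (Pre_detect_property_key geojson candidates) := by unfold Pre_detect_property_key; infer_instance

def pvWitness_detect_property_key : (List (String × List (List (String × List (String × String))))) × List String :=
  ([("features", [[("properties", [("name", "x")])]])], ["name", "id"])

def Spec_detect_property_key (geojson : List (String × List (List (String × List (String × String))))) (candidates : List String) (out : Option String) : Prop := out = detect_property_key_alt geojson candidates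
instance (geojson : List (String × List (List (String × List (String × String))))) (candidates : List String) (out : Option String) : Decidable (Spec_detect_property_key geojson candidates out) := by unfold Spec_detect_property_key; infer_instance

-- ===== CLAIM (what is proved, stated in full; the proofs are below) =====
def Claim_equal_detect_property_key : Prop := ∀ (geojson : List (String × List (List (String × List (String × String))))) (candidates : List String), Dom_detect_property_key geojson candidates → Pre_detect_property_key geojson candidates → Spec_detect_property_key geojson candidates (detect_property_key geojson candidates)

-- ===== LEMMAS AND PROOFS =====

-- number of features whose properties dict contains key c
def pvN (features : List (List (String × List (String × String)))) (c : String) : Int :=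
  Int.ofNat (features.countP (fun f =>
    (PySem.Dict.mk ((PySem.Dict.mk f).getD "properties" [])).contains c))

lemma pvN_cons (f : List (String × List (String × String)))
    (fs : List (List (String × List (String × String)))) (c : String) :
    pvN (f :: fs) c =
      (if (PySem.Dict.mk ((PySem.Dict.mk f).getD "properties" [])).contains c then 1 else 0)
      + pvN fs c := by
  unfold pvN
  rw [List.countP_cons]
  split_ifs <;> simp <;> omega

lemma pvN_nonneg (fs : List (List (String × List (String × String)))) (c : String) :
    0 ≤ pvN fs c := by
  unfold pvN; exact Int.ofNat_nonneg _

-- generic: folding conditional `modify k 0 (+1)` over a duplicate-free list adds exactly the indicator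
lemma foldl_mod_getD (P : String → Bool) :
    ∀ (cs : List String) (d : PySem.Dict String Int) (c : String), cs.Nodup →
    ((cs.foldl (fun d k => if P k then d.modify k 0 (· + 1) else d) d).getD c 0)
      = d.getD c 0 + (if c ∈ cs ∧ P c = true then 1 else 0) := by
  intro cs
  induction cs with
  | nil => intro d c _; simp
  | cons a t ih =>
    intro d c hnd
    rw [List.foldl_cons, ih _ c hnd.of_cons]
    rcases List.nodup_cons.mp hnd with ⟨hat, _⟩
    by_cases hca : c = a
    · subst hca
      by_cases hp : P c = true
      · rw [if_pos hp, PySem.Dict.getD_modify, if_pos rfl]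
        simp [hat, hp]
      · simp [hp, hat]
    · by_cases hp : P a = true
      · rw [if_pos hp, PySem.Dict.getD_modify, if_neg hca]
        simp [hca]
      · simp [hp, hca]

lemma foldl_mod_keys (P : String → Bool) :
    ∀ (cs : List String) (d : PySem.Dict String Int),
    (∀ k ∈ cs, d.contains k = true) →
    (cs.foldl (fun d k => if P k then d.modify k 0 (· + 1) else d) d).keys = d.keys := by
  intro cs
  induction cs with
  | nil => intro d _; simp
  | cons a t ih =>
    intro d h
    rw [List.foldl_cons]
    have hka : d.contains a = true := h a (by simp)
    have hkeys : (if P a then d.modify a 0 (· + 1) else d).keys = d.keys := by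
      split_ifs
      · rw [PySem.Dict.keys_modify, PySem.Dict.keys_insert_of_contains d _ hka]
      · rfl
    rw [ih _ ?_, hkeys]
    intro k hk
    rw [PySem.Dict.contains_iff_mem_keys, hkeys, ← PySem.Dict.contains_iff_mem_keys]
    exact h k (by simp [hk])

lemma foldl_insert0_getD :
    ∀ (cs : List String) (d : PySem.Dict String Int) (c : String),
    (cs.foldl (fun d k => d.insert k (0 : Int)) d).getD c 0
      = if c ∈ cs then 0 else d.getD c 0 := by
  intro cs
  induction cs with
  | nil => intro d c; simp
  | cons a t ih =>
    intro d c
    rw [List.foldl_cons, ih]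
    by_cases hct : c ∈ t
    · simp [hct]
    · by_cases hca : c = a
      · subst hca; simp [hct, PySem.Dict.getD_insert_self]
      · simp [hct, hca, PySem.Dict.getD_insert_of_ne _ _ _ hca]

lemma foldl_insert0_keys :
    ∀ (cs : List String) (d : PySem.Dict String Int), cs.Nodup →
    (∀ c ∈ cs, d.contains c = false) →
    (cs.foldl (fun d k => d.insert k (0 : Int)) d).keys = d.keys ++ cs := by
  intro cs
  induction cs with
  | nil => intro d _ _; simp
  | cons a t ih =>
    intro d hnd h
    rcases List.nodup_cons.mp hnd with ⟨hat, hndt⟩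
    rw [List.foldl_cons, ih _ hndt ?_, PySem.Dict.keys_insert_of_not_contains d _ (h a (by simp))]
    · simp
    · intro c hc
      rw [PySem.Dict.contains_insert]
      have : c ≠ a := fun he => hat (he ▸ hc)
      simp [this, h c (by simp [hc])]

-- A's outer loop, pointwise on a candidate
lemma foldA_getD (candidates : List String) (hnd : candidates.Nodup) :
    ∀ (fs : List (List (String × List (String × String)))) (d : PySem.Dict String Int)
      (c : String), c ∈ candidates →
    (fs.foldl
      (fun cnts feature =>
        candidates.foldl
          (fun cnts c' =>
            if (PySem.Dict.mk ((PySem.Dict.mk feature).getD "properties" [])).contains c' then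
              cnts.modify c' 0 (· + 1)
            else cnts)
          cnts)
      d).getD c 0 = d.getD c 0 + pvN fs c := by
  intro fs
  induction fs with
  | nil => intro d c _; simp [pvN]
  | cons f t ih =>
    intro d c hc
    rw [List.foldl_cons, ih _ c hc,
        foldl_mod_getD (fun c' => (PySem.Dict.mk ((PySem.Dict.mk f).getD "properties" [])).contains c') candidates d c hnd,
        pvN_cons]
    by_cases hp : (PySem.Dict.mk ((PySem.Dict.mk f).getD "properties" [])).contains c = true
    · simp [hp, hc]; ring
    · simp [hp, hc]

-- A's outer loop preserves the key list
lemma foldA_keys (candidates : List String) :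
    ∀ (fs : List (List (String × List (String × String)))) (d : PySem.Dict String Int),
    (∀ k ∈ candidates, d.contains k = true) →
    (fs.foldl
      (fun cnts feature =>
        candidates.foldl
          (fun cnts c' =>
            if (PySem.Dict.mk ((PySem.Dict.mk feature).getD "properties" [])).contains c' then
              cnts.modify c' 0 (· + 1)
            else cnts)
          cnts)
      d).keys = d.keys := by
  intro fs
  induction fs with
  | nil => intro d _; simp
  | cons f t ih =>
    intro d h
    rw [List.foldl_cons]
    have hstep := foldl_mod_keys
      (fun c' => (PySem.Dict.mk ((PySem.Dict.mk f).getD "properties" [])).contains c')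
      candidates d h
    rw [ih _ ?_, hstep]
    intro k hk
    rw [PySem.Dict.contains_iff_mem_keys, hstep, ← PySem.Dict.contains_iff_mem_keys]
    exact h k hk

-- B's outer loop, pointwise on a candidate
lemma foldB_getD (candidates : List String) :
    ∀ (fs : List (List (String × List (String × String)))) (d : PySem.Dict String Int)
      (c : String), c ∈ candidates →
    (fs.foldl
      (fun ctr feature =>
        (PySem.List.dedup (((PySem.Dict.mk feature).getD "properties" []).map Prod.fst)).foldl
          (fun ctr k => if PySem.Set.contains (PySem.Set.ofList candidates) k then ctr.modify k 0 (· + 1) else ctr)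
          ctr)
      d).getD c 0 = d.getD c 0 + pvN fs c := by
  intro fs
  induction fs with
  | nil => intro d c _; simp [pvN]
  | cons f t ih =>
    intro d c hc
    rw [List.foldl_cons, ih _ c hc,
        foldl_mod_getD (fun k => PySem.Set.contains (PySem.Set.ofList candidates) k)
          (PySem.List.dedup (((PySem.Dict.mk f).getD "properties" []).map Prod.fst)) d c
          (PySem.List.nodup_dedup _),
        pvN_cons]
    have hmem : c ∈ PySem.List.dedup (((PySem.Dict.mk f).getD "properties" []).map Prod.fst)
        ↔ (PySem.Dict.mk ((PySem.Dict.mk f).getD "properties" [])).contains c = true := by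
      rw [PySem.List.mem_dedup, PySem.Dict.contains_iff_mem_keys]
      rfl
    have hcs : PySem.Set.contains (PySem.Set.ofList candidates) c = true := by
      rw [PySem.Set.contains_iff, PySem.Set.mem_ofList]; exact hc
    by_cases hp : (PySem.Dict.mk ((PySem.Dict.mk f).getD "properties" [])).contains c = true
    · rw [if_pos ⟨hmem.mpr hp, hcs⟩, if_pos hp]; ring
    · rw [if_neg (fun h => hp (hmem.mp h.1)), if_neg hp]; ring

-- a dict with duplicate-free keys is its key list paired with its lookups
lemma items_eq_keys_map (d : PySem.Dict String Int) (h : d.keys.Nodup) :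
    d.items = d.keys.map (fun k => (k, d.getD k 0)) := by
  show d.items = (d.items.map (fun x => x.1)).map (fun k => (k, d.getD k 0))
  rw [List.map_map]
  conv_lhs => rw [← List.map_id d.items]
  apply List.map_congr_left
  intro p hp
  have hget : d.get? p.1 = some p.2 := PySem.Dict.get?_of_mem_items d (by exact hp) h
  simp [PySem.Dict.getD, hget]

-- A's max?-fold step, named so it can be compared across definitions
def selStep (p : Option (String × Int)) (x : String × Int) : Option (String × Int) :=
  match p with
  | none => some x
  | some m => if m.2 < x.2 then some x else some m

lemma max?_eq_foldl (xs : List (String × Int)) :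
    PySem.List.max? xs (fun x => x.2) = xs.foldl selStep none := by
  unfold PySem.List.max?
  apply PySem.List.foldl_congr_mem
  intro acc x _
  cases acc <;> rfl

-- relation between A's running max?-accumulator and B's strict-max scan state
def pvRel (p : Option (String × Int)) (q : Option String × Int) : Prop :=
  match p with
  | none => q = (none, 0)
  | some kv => 0 ≤ kv.2 ∧ q = (if 0 < kv.2 then (some kv.1, kv.2) else (none, 0))

lemma sel_fold (f : String → Int) :
    ∀ (cs : List String) (p : Option (String × Int)) (q : Option String × Int),
      (∀ c ∈ cs, 0 ≤ f c) → pvRel p q →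
      pvRel ((cs.map (fun c => (c, f c))).foldl selStep p)
            (cs.foldl (fun b c => if b.2 < f c then (some c, f c) else b) q) := by
  intro cs
  induction cs with
  | nil => intro p q _ h; simpa using h
  | cons a t ih =>
    intro p q hnn hr
    rw [List.map_cons, List.foldl_cons, List.foldl_cons]
    apply ih _ _ (fun c hc => hnn c (by simp [hc]))
    have hfa : 0 ≤ f a := hnn a (by simp)
    cases p with
    | none =>
      simp only [pvRel] at hr
      subst hr
      by_cases h0 : 0 < f a
      · simp [selStep, pvRel, h0, hfa]
      · have h0' : ¬ ((0:Int) < f a) := h0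
        simp [selStep, pvRel, h0', hfa]
    | some kv =>
      rcases hr with ⟨hkv, hq⟩
      subst hq
      by_cases hv : 0 < kv.2
      · rw [if_pos hv]
        by_cases hlt : kv.2 < f a
        · simp [selStep, pvRel, hlt, lt_trans hv hlt, le_of_lt (lt_trans hv hlt)]
        · simp [selStep, pvRel, hlt, hv, hkv]
      · rw [if_neg hv]
        have hv0 : kv.2 = 0 := le_antisymm (not_lt.mp hv) hkv
        by_cases hlt : kv.2 < f a
        · have h0 : (0:Int) < f a := hv0 ▸ hlt
          simp [selStep, pvRel, hlt, h0, hfa]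
        · have h0 : ¬ ((0:Int) < f a) := by omega
          simp [selStep, pvRel, h0, hv0]

def pvOut (p : Option (String × Int)) : Option String :=
  match p with
  | some pp => if 0 < pp.2 then some pp.1 else none
  | none => none

lemma pvRel_out (p : Option (String × Int)) (q : Option String × Int) (h : pvRel p q) :
    pvOut p = q.1 := by
  cases p with
  | none => simp only [pvRel] at h; subst h; rfl
  | some kv =>
    rcases h with ⟨_, hq⟩
    subst hq
    unfold pvOut
    by_cases hv : 0 < kv.2 <;> simp [hv]

lemma sel_eq (f : String → Int) (cs : List String) (hnn : ∀ c ∈ cs, 0 ≤ f c) :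
    pvOut (PySem.List.max? (cs.map (fun c => (c, f c))) (fun x => x.2))
    = (cs.foldl (fun (b : Option String × Int) c => if b.2 < f c then (some c, f c) else b)
        (none, 0)).1 := by
  rw [max?_eq_foldl]
  exact pvRel_out _ _ (sel_fold f cs none (none, 0) hnn (by simp [pvRel]))

lemma foldl_const {α β : Type} (l : List α) (d : β) :
    l.foldl (fun d _ => d) d = d := by
  induction l with
  | nil => rfl
  | cons a t ih => rw [List.foldl_cons]; exact ih

-- ===== VERDICT (by name: the statement is the Claim_ definition above) =====
theorem detect_property_key_spec : Claim_equal_detect_property_key := by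
  intro geojson candidates _ hpre
  unfold Spec_detect_property_key detect_property_key detect_property_key_alt
  simp only []
  set features := (PySem.Dict.mk geojson).getD "features" [] with hfeat
  by_cases hf : features.isEmpty
  · simp [hf]
  · rw [if_neg hf]
    cases hc : candidates with
    | nil =>
      simp only [hc, Bool.or_true, List.isEmpty_nil, if_true, List.foldl_nil]
      rw [foldl_const]
      simp [PySem.List.max?, PySem.Dict.empty]
    | cons c0 ct =>
      rw [← hc]
      have hcne : candidates.isEmpty = false := by rw [hc]; rfl
      rw [hcne, Bool.or_false, if_neg hf]
      -- A's counts dict: keys = candidates, value at c = pvN features c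
      have hkeys0 : (candidates.foldl (fun d c => d.insert c (0 : Int)) PySem.Dict.empty).keys
          = candidates := by
        rw [foldl_insert0_keys candidates PySem.Dict.empty hpre
          (fun c _ => PySem.Dict.contains_empty c), PySem.Dict.keys_empty, List.nil_append]
      have hkeys : (List.foldl
          (fun cnts feature =>
            candidates.foldl
              (fun cnts c =>
                if (PySem.Dict.mk ((PySem.Dict.mk feature).getD "properties" [])).contains c then
                  cnts.modify c 0 (· + 1)
                else cnts)
              cnts)
          (candidates.foldl (fun d c => d.insert c (0 : Int)) PySem.Dict.empty) features).keys
          = candidates := by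
        rw [foldA_keys candidates features _ ?_, hkeys0]
        intro k hk
        rw [PySem.Dict.contains_iff_mem_keys, hkeys0]; exact hk
      have hgetD : ∀ c ∈ candidates, (List.foldl
          (fun cnts feature =>
            candidates.foldl
              (fun cnts c =>
                if (PySem.Dict.mk ((PySem.Dict.mk feature).getD "properties" [])).contains c then
                  cnts.modify c 0 (· + 1)
                else cnts)
              cnts)
          (candidates.foldl (fun d c => d.insert c (0 : Int)) PySem.Dict.empty) features).getD c 0
          = pvN features c := by
        intro c hcc
        rw [foldA_getD candidates hpre features _ c hcc, foldl_insert0_getD, if_pos hcc,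
          zero_add]
      have hitems : (List.foldl
          (fun cnts feature =>
            candidates.foldl
              (fun cnts c =>
                if (PySem.Dict.mk ((PySem.Dict.mk feature).getD "properties" [])).contains c then
                  cnts.modify c 0 (· + 1)
                else cnts)
              cnts)
          (candidates.foldl (fun d c => d.insert c (0 : Int)) PySem.Dict.empty) features).items
          = candidates.map (fun c => (c, pvN features c)) := by
        rw [items_eq_keys_map _ (by rw [hkeys]; exact hpre), hkeys]
        exact List.map_congr_left (fun c hcc => by rw [hgetD c hcc])
      rw [hitems]
      -- B's counter lookups agree with pvN on candidates
      have hB : (candidates.foldl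
          (fun (b : Option String × Int) c =>
            if (List.foldl
                (fun ctr feature =>
                  (PySem.List.dedup (((PySem.Dict.mk feature).getD "properties" []).map Prod.fst)).foldl
                    (fun ctr k =>
                      if PySem.Set.contains (PySem.Set.ofList candidates) k then ctr.modify k 0 (· + 1)
                      else ctr)
                    ctr)
                (PySem.Dict.empty : PySem.Dict String Int) features).getD c 0 > b.2 then
              (some c, (List.foldl
                (fun ctr feature =>
                  (PySem.List.dedup (((PySem.Dict.mk feature).getD "properties" []).map Prod.fst)).foldl
                    (fun ctr k =>
                      if PySem.Set.contains (PySem.Set.ofList candidates) k then ctr.modify k 0 (· + 1)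
                      else ctr)
                    ctr)
                (PySem.Dict.empty : PySem.Dict String Int) features).getD c 0)
            else b)
          (none, 0))
          = (candidates.foldl
            (fun (b : Option String × Int) c => if b.2 < pvN features c then (some c, pvN features c) else b)
            (none, 0)) := by
        apply PySem.List.foldl_congr_mem
        intro acc c hcc
        have := foldB_getD candidates features PySem.Dict.empty c hcc
        rw [PySem.Dict.getD_empty, zero_add] at this
        rw [this]
      rw [hB, ← sel_eq (pvN features) candidates (fun c _ => pvN_nonneg features c)]
      unfold pvOut
      cases hmax : PySem.List.max? (candidates.map (fun c => (c, pvN features c))) (fun x => x.2) with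
      | none => simp
      | some p =>
        by_cases hv : 0 < p.2
        · simp [hv]
        · have hv' : ¬ ((0:Int) < p.2) := hv
          simp [hv']
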